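-- pv_equiv track=rewrite | github.com/tanmayc07/leetcode | 3876-construct-uniform-parity-array-ii/3876-construct-uniform-parity-array-ii.py | uniformArray
-- ===== SOURCE A (Python) =====
-- def uniformArray(nums1: list[int]) -> bool:
--     mx = min(nums1)
--     even_odd = 0 if mx%2 == 0 else 1
--
--     f = 1
--     for i in range(len(nums1)):
--         if nums1[i]%2 != even_odd:
--             p = nums1[i]-mx
--             if p>=1 and p%2 != even_odd:
--                 f = 0
--                 break
--
--     return f == 1
-- ===== SOURCE B (Python) =====
-- def uniformArray(nums1: list[int]) -> bool:
--     odds = [x for x in nums1 if x % 2 != 0]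
--     evens = [x for x in nums1 if x % 2 == 0]
--     if not odds or not evens:
--         return True
--     return min(odds) < min(evens)
-- ===== Notes on version B (the rewrite author's own statement) =====
-- stated objective: alternative
-- what changed: Instead of A's single flagged loop with p = nums[i]-mx difference arithmetic over the global minimum, B partitions the list into odds and evens and decides by comparing the two minima: uniform iff one class is empty or the smallest odd beats the smallest even.
import Mathlib
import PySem

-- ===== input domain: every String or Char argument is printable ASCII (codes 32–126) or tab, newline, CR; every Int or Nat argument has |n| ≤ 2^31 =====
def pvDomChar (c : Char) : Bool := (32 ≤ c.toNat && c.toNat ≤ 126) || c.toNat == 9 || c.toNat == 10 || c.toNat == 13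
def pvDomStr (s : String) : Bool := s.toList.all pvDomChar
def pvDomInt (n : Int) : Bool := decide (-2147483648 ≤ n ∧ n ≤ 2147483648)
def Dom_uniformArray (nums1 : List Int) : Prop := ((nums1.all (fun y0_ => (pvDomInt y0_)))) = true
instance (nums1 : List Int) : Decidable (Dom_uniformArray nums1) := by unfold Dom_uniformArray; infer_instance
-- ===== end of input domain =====

-- B partitions into odds and evens and compares the two minima instead of A's flagged loop with difference arithmetic (alternative; same cost).

-- ===== PORT A =====
-- the for-loop with break: f stays 1 until the inner condition fires, then the loop stops with f = 0
def uniformLoopA (nums1 : List Int) (mx even_odd : Int) : List Int → Int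
  | [] => 1
  | i :: rest =>
    if PySem.Int.mod (PySem.List.pyGetD nums1 i 0) 2 ≠ even_odd then
      let p := PySem.List.pyGetD nums1 i 0 - mx
      if p ≥ 1 ∧ PySem.Int.mod p 2 ≠ even_odd then 0
      else uniformLoopA nums1 mx even_odd rest
    else uniformLoopA nums1 mx even_odd rest

def uniformArray (nums1 : List Int) : Bool :=
  match PySem.List.min? nums1 (fun x => x) with
  | none => false   -- unreachable under Pre_: min([]) raises ValueError
  | some mx =>
    let even_odd : Int := if PySem.Int.mod mx 2 = 0 then 0 else 1
    let f := uniformLoopA nums1 mx even_odd (PySem.List.pyRange 0 nums1.length 1)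
    f == 1

-- ===== PORT B =====
def uniformArray_alt (nums1 : List Int) : Bool :=
  let odds := nums1.filter (fun x => PySem.Int.mod x 2 != 0)
  let evens := nums1.filter (fun x => PySem.Int.mod x 2 == 0)
  if odds = [] ∨ evens = [] then true
  else
    match PySem.List.min? odds (fun x => x), PySem.List.min? evens (fun x => x) with
    | some mo, some me => decide (mo < me)
    | _, _ => false   -- unreachable: both lists are nonempty here

-- ===== PRECONDITION & SPEC =====
-- Pre_ excludes only the empty list, on which A's min(nums1) raises ValueError.
def Pre_uniformArray (nums1 : List Int) : Prop := nums1 ≠ []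
instance (nums1 : List Int) : Decidable (Pre_uniformArray nums1) := by unfold Pre_uniformArray; infer_instance
def pvWitness_uniformArray : List Int := [2, 4, 7]

def Spec_uniformArray (nums1 : List Int) (out : Bool) : Prop := out = uniformArray_alt nums1
instance (nums1 : List Int) (out : Bool) : Decidable (Spec_uniformArray nums1 out) := by unfold Spec_uniformArray; infer_instance

-- ===== CLAIM (what is proved, stated in full; the proofs are below) =====
def Claim_equal_uniformArray : Prop := ∀ (nums1 : List Int), Dom_uniformArray nums1 → Pre_uniformArray nums1 → Spec_uniformArray nums1 (uniformArray nums1)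

-- ===== LEMMAS AND PROOFS =====

-- if the minimum is odd, A's inner break condition never fires
theorem loopA_odd (nums1 : List Int) (mx : Int) (hmx : PySem.Int.mod mx 2 = 1)
    (idxs : List Int) : uniformLoopA nums1 mx 1 idxs = 1 := by
  induction idxs with
  | nil => rfl
  | cons i rest ih =>
    simp only [uniformLoopA]
    have h2 : (0:Int) < 2 := by decide
    rw [PySem.Int.mod_eq_emod_of_pos h2] at hmx
    split_ifs with h1 h2'
    · exfalso
      rw [PySem.Int.mod_eq_emod_of_pos h2] at h1
      obtain ⟨hp1, hp2⟩ := h2'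
      rw [PySem.Int.mod_eq_emod_of_pos h2] at hp2
      omega
    · exact ih
    · exact ih

-- if the minimum is even, the loop over in-range indices returns 1 iff all touched elements are even
theorem loopA_even (nums1 : List Int) (mx : Int) (hmx : PySem.Int.mod mx 2 = 0)
    (hmin : ∀ y ∈ nums1, mx ≤ y)
    (idxs : List Int) (H : ∀ i ∈ idxs, 0 ≤ i ∧ i < nums1.length) :
    (uniformLoopA nums1 mx 0 idxs = 1 ↔
      ∀ i ∈ idxs, PySem.Int.mod (PySem.List.pyGetD nums1 i 0) 2 = 0) := by
  induction idxs with
  | nil => simp [uniformLoopA]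
  | cons i rest ih =>
    have hi := H i (by simp)
    have hrest := ih (fun j hj => H j (by simp [hj]))
    have h2 : (0:Int) < 2 := by decide
    have hvmem : PySem.List.pyGetD nums1 i 0 ∈ nums1 := by
      rw [PySem.List.pyGetD_eq_getElem _ _ hi.1 hi.2]
      exact List.getElem_mem _
    have hge : mx ≤ PySem.List.pyGetD nums1 i 0 := hmin _ hvmem
    simp only [uniformLoopA]
    split_ifs with h1 hbrk
    · constructor
      · intro h; exact absurd h (by decide)
      · intro hall
        exact absurd (hall i (by simp)) h1
    · -- element odd but break condition failed: impossible when mx is even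
      exfalso
      rw [PySem.Int.mod_eq_emod_of_pos h2] at hmx h1
      apply hbrk
      constructor
      · omega
      · rw [PySem.Int.mod_eq_emod_of_pos h2]; omega
    · rw [hrest]
      constructor
      · intro hall j hj
        rcases List.mem_cons.mp hj with rfl | hj'
        · exact not_not.mp h1
        · exact hall j hj'
      · intro hall j hj; exact hall j (by simp [hj])

-- A on a nonempty list with minimum mx computes: mx odd, or every element even
theorem uniformArray_eq_rule (nums1 : List Int) (mx : Int)
    (hmin : PySem.List.min? nums1 (fun x => x) = some mx) :
    uniformArray nums1 =
      (decide (PySem.Int.mod mx 2 = 1) || nums1.all (fun x => PySem.Int.mod x 2 == 0)) := by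
  have hisMin : ∀ y ∈ nums1, mx ≤ y := by
    intro y hy
    simpa using PySem.List.min?_isMin hmin y hy
  have h2 : (0:Int) < 2 := by decide
  have hmx01 : PySem.Int.mod mx 2 = 0 ∨ PySem.Int.mod mx 2 = 1 := by
    rw [PySem.Int.mod_eq_emod_of_pos h2]; omega
  unfold uniformArray
  rw [hmin]
  rcases hmx01 with he | ho
  · have hone : ¬ PySem.Int.mod mx 2 = 1 := by rw [he]; decide
    simp only [if_pos he, hone, decide_false, Bool.false_or]
    have H : ∀ i ∈ PySem.List.pyRange 0 nums1.length 1, 0 ≤ i ∧ i < nums1.length := by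
      intro i hi
      have := (PySem.List.mem_pyRange_one).mp hi
      omega
    have hloop := loopA_even nums1 mx he hisMin _ H
    by_cases hall : ∀ i ∈ PySem.List.pyRange 0 nums1.length 1,
        PySem.Int.mod (PySem.List.pyGetD nums1 i 0) 2 = 0
    · rw [hloop.mpr hall]
      have hall' : nums1.all (fun x => PySem.Int.mod x 2 == 0) = true := by
        rw [List.all_eq_true]
        intro x hx
        obtain ⟨j, hj, hxj⟩ := List.mem_iff_getElem.mp hx
        have hmem : (j : Int) ∈ PySem.List.pyRange 0 nums1.length 1 := by
          rw [PySem.List.mem_pyRange_one]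
          constructor <;> [positivity; exact_mod_cast hj]
        have := hall _ hmem
        rw [PySem.List.pyGetD_eq_getElem _ _ (by positivity) (by exact_mod_cast hj)] at this
        simp only [Int.toNat_natCast] at this
        rw [hxj] at this
        simpa using this
      rw [hall']
      rfl
    · have hne : uniformLoopA nums1 mx 0 (PySem.List.pyRange 0 nums1.length 1) ≠ 1 := by
        intro h; exact hall (hloop.mp h)
      have h0 : (uniformLoopA nums1 mx 0 (PySem.List.pyRange 0 nums1.length 1) == 1) = false := by
        simpa using hne
      rw [h0]
      push Not at hall
      obtain ⟨i, hi, hodd⟩ := hall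
      have hir := (PySem.List.mem_pyRange_one).mp hi
      have hall' : nums1.all (fun x => PySem.Int.mod x 2 == 0) = false := by
        rw [List.all_eq_false]
        refine ⟨PySem.List.pyGetD nums1 i 0, ?_, by simpa using hodd⟩
        rw [PySem.List.pyGetD_eq_getElem _ _ (by omega) (by omega)]
        exact List.getElem_mem _
      rw [hall']
  · have hzero : ¬ PySem.Int.mod mx 2 = 0 := by rw [ho]; decide
    simp only [if_neg hzero]
    rw [loopA_odd nums1 mx ho]
    have hd : decide (PySem.Int.mod mx 2 = 1) = true := decide_eq_true ho
    rw [hd, Bool.true_or]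
    rfl

-- B on a nonempty list with minimum mx computes the same rule
theorem uniformArray_alt_eq_rule (nums1 : List Int) (mx : Int)
    (hmin : PySem.List.min? nums1 (fun x => x) = some mx) :
    uniformArray_alt nums1 =
      (decide (PySem.Int.mod mx 2 = 1) || nums1.all (fun x => PySem.Int.mod x 2 == 0)) := by
  have hmem : mx ∈ nums1 := PySem.List.min?_mem hmin
  have hisMin : ∀ y ∈ nums1, mx ≤ y := by
    intro y hy
    simpa using PySem.List.min?_isMin hmin y hy
  have h2 : (0:Int) < 2 := by decide
  have hmx01 : PySem.Int.mod mx 2 = 0 ∨ PySem.Int.mod mx 2 = 1 := by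
    rw [PySem.Int.mod_eq_emod_of_pos h2]; omega
  unfold uniformArray_alt
  simp only []
  set odds := nums1.filter (fun x => PySem.Int.mod x 2 != 0) with hodds_def
  set evens := nums1.filter (fun x => PySem.Int.mod x 2 == 0) with hevens_def
  rcases hmx01 with he | ho
  · -- minimum even: result is "all even", i.e. odds = []
    have hone : ¬ PySem.Int.mod mx 2 = 1 := by rw [he]; decide
    have hmxe : mx ∈ evens := by
      rw [hevens_def, List.mem_filter]
      exact ⟨hmem, by rw [he]; decide⟩
    have hev_ne : evens ≠ [] := by intro h; rw [h] at hmxe; simp at hmxe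
    by_cases ho0 : odds = []
    · -- all elements even
      have hall : nums1.all (fun x => PySem.Int.mod x 2 == 0) = true := by
        rw [List.all_eq_true]
        intro x hx
        by_contra hxo
        have : x ∈ odds := by
          rw [hodds_def, List.mem_filter]
          refine ⟨hx, ?_⟩
          simpa using hxo
        rw [ho0] at this; simp at this
      rw [if_pos (Or.inl ho0), hall, Bool.or_true]
    · -- some odd element exists: result false on both counts
      have hall : nums1.all (fun x => PySem.Int.mod x 2 == 0) = false := by
        obtain ⟨y, hy⟩ := List.exists_mem_of_ne_nil _ ho0
        rw [hodds_def, List.mem_filter] at hy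
        rw [List.all_eq_false]
        exact ⟨y, hy.1, by simpa using hy.2⟩
      rw [if_neg (by simp [ho0, hev_ne]), hall]
      cases hmo : PySem.List.min? odds (fun x => x) with
      | none => exact absurd ((PySem.List.min?_eq_none_iff _ _).mp hmo) ho0
      | some mo =>
        cases hme : PySem.List.min? evens (fun x => x) with
        | none => exact absurd ((PySem.List.min?_eq_none_iff _ _).mp hme) hev_ne
        | some me =>
          have hmo_mem : mo ∈ odds := PySem.List.min?_mem hmo
          have hmo_n : mo ∈ nums1 := by
            rw [hodds_def, List.mem_filter] at hmo_mem; exact hmo_mem.1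
          have hme_le : me ≤ mx := by
            simpa using PySem.List.min?_isMin hme mx hmxe
          have hmx_le : mx ≤ mo := hisMin mo hmo_n
          have hd : decide (PySem.Int.mod mx 2 = 1) = false := decide_eq_false hone
          rw [hd, Bool.false_or]
          exact decide_eq_false (by omega)
  · -- minimum odd: result true on both counts
    have hmxo : mx ∈ odds := by
      rw [hodds_def, List.mem_filter]
      exact ⟨hmem, by rw [ho]; decide⟩
    have hod_ne : odds ≠ [] := by intro h; rw [h] at hmxo; simp at hmxo
    by_cases he0 : evens = []
    · rw [if_pos (Or.inr he0)]
      have hd : decide (PySem.Int.mod mx 2 = 1) = true := decide_eq_true ho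
      rw [hd, Bool.true_or]
    · rw [if_neg (by simp [hod_ne, he0])]
      cases hmo : PySem.List.min? odds (fun x => x) with
      | none => exact absurd ((PySem.List.min?_eq_none_iff _ _).mp hmo) hod_ne
      | some mo =>
        cases hme : PySem.List.min? evens (fun x => x) with
        | none => exact absurd ((PySem.List.min?_eq_none_iff _ _).mp hme) he0
        | some me =>
          have hmo_le : mo ≤ mx := by
            simpa using PySem.List.min?_isMin hmo mx hmxo
          have hme_mem : me ∈ evens := PySem.List.min?_mem hme
          rw [hevens_def, List.mem_filter] at hme_mem
          have hmx_le : mx ≤ me := hisMin me hme_mem.1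
          have hme_even : PySem.Int.mod me 2 = 0 := by simpa using hme_mem.2
          have hmo_mem : mo ∈ odds := PySem.List.min?_mem hmo
          have hmo_odd : PySem.Int.mod mo 2 ≠ 0 := by
            rw [hodds_def, List.mem_filter] at hmo_mem
            simpa using hmo_mem.2
          have hne : mo ≠ me := fun hEq => hmo_odd (hEq ▸ hme_even)
          have hlt : mo < me := lt_of_le_of_ne (le_trans hmo_le hmx_le) hne
          have hd : decide (PySem.Int.mod mx 2 = 1) = true := decide_eq_true ho
          rw [hd, Bool.true_or]
          exact decide_eq_true hlt

-- ===== VERDICT =====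
theorem uniformArray_spec : Claim_equal_uniformArray := by
  intro nums1 _ hpre
  unfold Spec_uniformArray
  cases hmin : PySem.List.min? nums1 (fun x => x) with
  | none => exact absurd ((PySem.List.min?_eq_none_iff _ _).mp hmin) hpre
  | some mx =>
    rw [uniformArray_eq_rule nums1 mx hmin, uniformArray_alt_eq_rule nums1 mx hmin]
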